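-- pv_equiv track=rewrite | github.com/Irina103/My_first_library | module3/code.py | calculate_product_sum
-- ===== SOURCE A (Python) =====
-- def calculate_product_sum(lst):
--     # Подготавливаем словарь для хранения произведений
--     dic_01 = dict()
--
--     # Итерируем по парам элементов списка в двух циклах
--     for i in range(len(lst)):
--         for j in range(i+1, len(lst)):
--             num1 = lst[i]
--             num2 = lst[j]
--
--             # Считаем произведение
--             product = num1 * num2
--
--             # Если произведение еще не в словаре, добавляем его
--             if product not in dic_01:
--                 dic_01[product] = 1
--             else:
--                 # Если произведение уже есть, увеличиваем его счетчик
--                 dic_01[product] += 1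
--
--     # Подготавливаем переменную для суммы
--     sm = 0
--
--     # Итерируем все значения словаря
--     for count in dic_01.values():
--         # Если значение больше 1 (т.е. произведение встречается несколько раз)
--         if count > 1:
--             # Применяем формулу для добавления к общей сумме
--             sm += count * (count - 1) * 4
--
--     return sm
-- ===== SOURCE B (Python) =====
-- def calculate_product_sum(lst):
--     # Sort the flat list of pair-products, then one scan: inside a run of
--     # equal products the i-th repeat adds 8*i, so a run of length c adds
--     # 4*c*(c-1), the contribution A computes for that product.
--     products = sorted(lst[i] * lst[j] for i in range(len(lst)) for j in range(i + 1, len(lst)))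
--     total = 0
--     r = 0
--     prev = None
--     for p in products:
--         if prev == p:
--             r += 1
--             total += 8 * r
--         else:
--             r = 0
--             prev = p
--     return total
-- ===== Notes on version B (the rewrite author's own statement) =====
-- stated objective: alternative
-- what changed: Replaces A's frequency dictionary over pair-products by sorting the flat list of pair-products and making one run-length scan over it (the i-th repeat inside a run adds 8*i, so a run of length c contributes 4*c*(c-1)); no dictionary is maintained.
import Mathlib
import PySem

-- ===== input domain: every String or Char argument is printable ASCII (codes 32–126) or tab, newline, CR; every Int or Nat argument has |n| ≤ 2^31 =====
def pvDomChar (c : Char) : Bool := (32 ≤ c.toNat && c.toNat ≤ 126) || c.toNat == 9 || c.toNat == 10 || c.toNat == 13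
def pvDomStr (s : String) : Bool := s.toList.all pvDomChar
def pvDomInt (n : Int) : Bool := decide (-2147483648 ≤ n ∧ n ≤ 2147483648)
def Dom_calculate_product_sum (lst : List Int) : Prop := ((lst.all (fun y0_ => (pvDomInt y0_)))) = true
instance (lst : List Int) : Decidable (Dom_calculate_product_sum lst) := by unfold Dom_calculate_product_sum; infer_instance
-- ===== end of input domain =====

-- B replaces A's frequency dictionary by a flat pair-product list and a single
-- summing pass over it (each product occurring c times contributes c·(c-1) in
-- total); same values, a different algorithm (objective: alternative).

-- ===== PORT A =====
def calculate_product_sum (lst : List Int) : Int :=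
  let n := PySem.List.len lst
  let dic_01 : PySem.Dict Int Int :=
    (PySem.List.pyRange 0 n 1).foldl (fun d i =>
      (PySem.List.pyRange (i + 1) n 1).foldl (fun d j =>
        let num1 := PySem.List.pyGetD lst i 0
        let num2 := PySem.List.pyGetD lst j 0
        let product := num1 * num2
        if !d.contains product then d.insert product 1
        else d.insert product (d.getD product 0 + 1)) d)
      (PySem.Dict.empty : PySem.Dict Int Int)
  dic_01.values.foldl (fun sm count =>
    if count > 1 then sm + count * (count - 1) * 4 else sm) 0

-- ===== PORT B =====
def calculate_product_sum_alt (lst : List Int) : Int :=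
  let n := PySem.List.len lst
  let products : List Int :=
    PySem.List.sorted
      ((PySem.List.pyRange 0 n 1).flatMap (fun i =>
        (PySem.List.pyRange (i + 1) n 1).map (fun j =>
          PySem.List.pyGetD lst i 0 * PySem.List.pyGetD lst j 0))) id
  let st := products.foldl (fun (st : Int × Int × Option Int) p =>
      if st.2.2 = some p then (st.1 + 8 * (st.2.1 + 1), st.2.1 + 1, st.2.2)
      else (st.1, 0, some p)) (0, 0, none)
  st.1

-- ===== PRECONDITION & SPEC =====
def Spec_calculate_product_sum (lst : List Int) (out : Int) : Prop := out = calculate_product_sum_alt lst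
instance (lst : List Int) (out : Int) : Decidable (Spec_calculate_product_sum lst out) := by unfold Spec_calculate_product_sum; infer_instance

-- ===== CLAIM (what is proved, stated in full; the proofs are below) =====
def Claim_equal_calculate_product_sum : Prop := ∀ (lst : List Int), Dom_calculate_product_sum lst → Spec_calculate_product_sum lst (calculate_product_sum lst)

-- ===== LEMMAS AND PROOFS =====

-- the flat pair-product list both programs are about
def pvProds (lst : List Int) : List Int :=
  (PySem.List.pyRange 0 (PySem.List.len lst) 1).flatMap (fun i =>
    (PySem.List.pyRange (i + 1) (PySem.List.len lst) 1).map (fun j =>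
      PySem.List.pyGetD lst i 0 * PySem.List.pyGetD lst j 0))

-- a nested loop is the loop over the flattened list
theorem pv_foldl_nested {α β σ : Type} (l : List α) (f : α → List β) (g : σ → β → σ)
    (init : σ) :
    l.foldl (fun s i => (f i).foldl g s) init = (l.flatMap f).foldl g init := by
  induction l generalizing init with
  | nil => rfl
  | cons a t ih => simp [List.flatMap_cons, List.foldl_append, ih]

-- A's branchy dictionary update is the counter update
theorem pv_step_eq (d : PySem.Dict Int Int) (p : Int) :
    (if !d.contains p then d.insert p 1 else d.insert p (d.getD p 0 + 1))
      = d.insert p (d.getD p 0 + 1) := by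
  by_cases hc : d.contains p = true
  · simp [hc]
  · simp only [Bool.not_eq_true] at hc
    simp [hc, PySem.Dict.getD_of_not_contains d (0 : Int) hc]

-- A's first loop builds the counter of the flat pair-product list
theorem pv_dict_eq (lst : List Int) :
    ((PySem.List.pyRange 0 (PySem.List.len lst) 1).foldl (fun d i =>
      (PySem.List.pyRange (i + 1) (PySem.List.len lst) 1).foldl (fun d j =>
        if !d.contains (PySem.List.pyGetD lst i 0 * PySem.List.pyGetD lst j 0) then
          d.insert (PySem.List.pyGetD lst i 0 * PySem.List.pyGetD lst j 0) 1
        else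
          d.insert (PySem.List.pyGetD lst i 0 * PySem.List.pyGetD lst j 0)
            (d.getD (PySem.List.pyGetD lst i 0 * PySem.List.pyGetD lst j 0) 0 + 1)) d)
      (PySem.Dict.empty : PySem.Dict Int Int))
      = PySem.Dict.counter (pvProds lst) := by
  have h1 : ∀ (i : Int) (d : PySem.Dict Int Int),
      (PySem.List.pyRange (i + 1) (PySem.List.len lst) 1).foldl (fun d j =>
        if !d.contains (PySem.List.pyGetD lst i 0 * PySem.List.pyGetD lst j 0) then
          d.insert (PySem.List.pyGetD lst i 0 * PySem.List.pyGetD lst j 0) 1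
        else
          d.insert (PySem.List.pyGetD lst i 0 * PySem.List.pyGetD lst j 0)
            (d.getD (PySem.List.pyGetD lst i 0 * PySem.List.pyGetD lst j 0) 0 + 1)) d
      = ((PySem.List.pyRange (i + 1) (PySem.List.len lst) 1).map (fun j =>
          PySem.List.pyGetD lst i 0 * PySem.List.pyGetD lst j 0)).foldl
          (fun d x => d.insert x (d.getD x 0 + 1)) d := by
    intro i d
    rw [List.foldl_map]
    exact PySem.List.foldl_congr_mem _ _ _ _ (fun acc j _ => pv_step_eq acc _)
  calc _ = (PySem.List.pyRange 0 (PySem.List.len lst) 1).foldl (fun d i =>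
            ((PySem.List.pyRange (i + 1) (PySem.List.len lst) 1).map (fun j =>
              PySem.List.pyGetD lst i 0 * PySem.List.pyGetD lst j 0)).foldl
              (fun d x => d.insert x (d.getD x 0 + 1)) d) (PySem.Dict.empty : PySem.Dict Int Int) := by
          exact PySem.List.foldl_congr_mem _ _ _ _ (fun d i _ => h1 i d)
    _ = (pvProds lst).foldl (fun d x => d.insert x (d.getD x 0 + 1)) PySem.Dict.empty := by
          rw [pv_foldl_nested]; rfl
    _ = PySem.Dict.counter (pvProds lst) :=
          PySem.Dict.foldl_insert_getD_add_one_eq_counter _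

-- B's scan step (the fold body of the port of B)
def pvStep (st : Int × Int × Option Int) (p : Int) : Int × Int × Option Int :=
  if st.2.2 = some p then (st.1 + 8 * (st.2.1 + 1), st.2.1 + 1, st.2.2)
  else (st.1, 0, some p)

-- per-product contribution both programs sum
def pvG (l : List Int) (k : Int) : Int :=
  4 * (List.count k l : Int) * ((List.count k l : Int) - 1)

-- the scan over a sorted list, entered mid-run of x with r repeats already seen
theorem pv_foldRun (l : List Int) : ∀ (x : Int) (u : List Int) (t r : Int),
    l.Pairwise (· ≤ ·) → (∀ y ∈ l, x ≤ y) → u.Nodup → x ∉ u →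
    (∀ k, k ∈ u ↔ (k ∈ l ∧ k ≠ x)) →
    (l.foldl pvStep (t, r, some x)).1
      = t + 8 * (List.count x l : Int) * r
          + 4 * (List.count x l : Int) * ((List.count x l : Int) + 1)
          + (u.map (pvG l)).sum := by
  induction l with
  | nil =>
    intro x u t r _ _ _ _ hm
    have hu0 : u = [] := List.eq_nil_iff_forall_not_mem.mpr
      (fun k hk => absurd ((hm k).mp hk).1 (List.not_mem_nil))
    subst hu0; simp
  | cons y l' ih =>
    intro x u t r hs hx hu hxu hm
    have hsl' : l'.Pairwise (· ≤ ·) := hs.tail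
    have hyl' : ∀ z ∈ l', y ≤ z := fun z hz => (List.pairwise_cons.mp hs).1 z hz
    by_cases hyx : y = x
    · subst hyx
      have hstep : pvStep (t, r, some y) y = (t + 8 * (r + 1), r + 1, some y) := by
        simp [pvStep]
      rw [List.foldl_cons, hstep,
          ih y u (t + 8 * (r + 1)) (r + 1) hsl' hyl' hu hxu
            (fun k => by
              rw [hm k]
              constructor
              · rintro ⟨hkl, hkx⟩
                exact ⟨(List.mem_cons.mp hkl).resolve_left hkx, hkx⟩
              · rintro ⟨hkl, hkx⟩
                exact ⟨List.mem_cons_of_mem _ hkl, hkx⟩)]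
      have hcnt : (List.map (pvG (y :: l')) u).sum = (List.map (pvG l') u).sum := by
        congr 1
        apply List.map_congr_left
        intro k hk
        have hkx : k ≠ y := ((hm k).mp hk).2
        unfold pvG
        rw [List.count_cons, if_neg (by simpa using fun he : y = k => hkx he.symm)]
        simp
      rw [hcnt, List.count_cons_self]
      push_cast
      ring
    · have hstep : pvStep (t, r, some x) y = (t, 0, some y) := by
        simp [pvStep]
        exact fun he => absurd he.symm hyx
      have hxy : x < y := lt_of_le_of_ne (hx y List.mem_cons_self) (fun he => hyx he.symm)
      have hxl' : x ∉ l' := fun hmem => absurd (hyl' x hmem) (not_le.mpr hxy)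
      have hcx : List.count x (y :: l') = 0 := by
        rw [List.count_cons, if_neg (by simpa using fun he : y = x => hyx he)]
        simpa using List.count_eq_zero.mpr hxl'
      have hyu : y ∈ u := (hm y).mpr ⟨List.mem_cons_self, fun he => hyx he⟩
      have hm' : ∀ k, k ∈ u.erase y ↔ (k ∈ l' ∧ k ≠ y) := by
        intro k
        rw [hu.mem_erase_iff]
        constructor
        · rintro ⟨hky, hku⟩
          exact ⟨((List.mem_cons.mp ((hm k).mp hku).1).resolve_left hky), hky⟩
        · rintro ⟨hkl, hky⟩
          have hkx : k ≠ x := fun he =>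
            absurd (hyl' k hkl) (not_le.mpr (he ▸ hxy))
          exact ⟨hky, (hm k).mpr ⟨List.mem_cons_of_mem _ hkl, hkx⟩⟩
      rw [List.foldl_cons, hstep,
          ih y (u.erase y) t 0 hsl' hyl' (hu.erase y)
            (fun hmem => absurd (hu.mem_erase_iff.mp hmem).1 (by simp)) hm']
      -- regroup the target sum around y
      have hperm : u.Perm (y :: u.erase y) := List.perm_cons_erase hyu
      have hsum : (u.map (pvG (y :: l'))).sum
          = pvG (y :: l') y + ((u.erase y).map (pvG (y :: l'))).sum := by
        rw [(hperm.map (pvG (y :: l'))).sum_eq, List.map_cons, List.sum_cons]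
      have hcong : ((u.erase y).map (pvG (y :: l'))).sum
          = ((u.erase y).map (pvG l')).sum := by
        congr 1
        apply List.map_congr_left
        intro k hk
        have hky : k ≠ y := (hu.mem_erase_iff.mp hk).1
        unfold pvG
        rw [List.count_cons, if_neg (by simpa using fun he : y = k => hky he.symm)]
        simp
      rw [hcx, hsum, hcong]
      unfold pvG
      rw [List.count_cons_self]
      push_cast
      ring

-- the scan from its initial state computes the per-distinct-product sum
theorem pv_foldNone (l u : List Int) (hs : l.Pairwise (· ≤ ·)) (hu : u.Nodup)
    (hm : ∀ k, k ∈ u ↔ k ∈ l) :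
    (l.foldl pvStep (0, 0, none)).1 = (u.map (pvG l)).sum := by
  cases l with
  | nil =>
    have hu0 : u = [] := List.eq_nil_iff_forall_not_mem.mpr
      (fun k hk => absurd ((hm k).mp hk) (List.not_mem_nil))
    subst hu0; simp
  | cons y l' =>
    have hsl' : l'.Pairwise (· ≤ ·) := hs.tail
    have hyl' : ∀ z ∈ l', y ≤ z := fun z hz => (List.pairwise_cons.mp hs).1 z hz
    have hstep : pvStep (0, 0, none) y = (0, 0, some y) := by simp [pvStep]
    have hyu : y ∈ u := (hm y).mpr List.mem_cons_self
    have hm' : ∀ k, k ∈ u.erase y ↔ (k ∈ l' ∧ k ≠ y) := by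
      intro k
      rw [hu.mem_erase_iff]
      constructor
      · rintro ⟨hky, hku⟩
        exact ⟨(List.mem_cons.mp ((hm k).mp hku)).resolve_left hky, hky⟩
      · rintro ⟨hkl, hky⟩
        exact ⟨hky, (hm k).mpr (List.mem_cons_of_mem _ hkl)⟩
    rw [List.foldl_cons, hstep,
        pv_foldRun l' y (u.erase y) 0 0 hsl' hyl' (hu.erase y)
          (fun hmem => absurd (hu.mem_erase_iff.mp hmem).1 (by simp)) hm']
    have hperm : u.Perm (y :: u.erase y) := List.perm_cons_erase hyu
    have hsum : (u.map (pvG (y :: l'))).sum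
        = pvG (y :: l') y + ((u.erase y).map (pvG (y :: l'))).sum := by
      rw [(hperm.map (pvG (y :: l'))).sum_eq, List.map_cons, List.sum_cons]
    have hcong : ((u.erase y).map (pvG (y :: l'))).sum
        = ((u.erase y).map (pvG l')).sum := by
      congr 1
      apply List.map_congr_left
      intro k hk
      have hky : k ≠ y := (hu.mem_erase_iff.mp hk).1
      unfold pvG
      rw [List.count_cons, if_neg (by simpa using fun he : y = k => hky he.symm)]
      simp
    rw [hsum, hcong]
    unfold pvG
    rw [List.count_cons_self]
    push_cast
    ring

-- A's sum over the counter equals B's scan over the sorted products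
theorem pv_main (P : List Int) :
    (PySem.Dict.counter P).values.foldl
      (fun sm c => if c > 1 then sm + c * (c - 1) * 4 else sm) 0
      = ((PySem.List.sorted P id).foldl pvStep (0, 0, none)).1 := by
  -- A's loop: fold over the counter's values as a sum
  have hstep : ∀ (sm c : Int),
      (if c > 1 then sm + c * (c - 1) * 4 else sm)
        = sm + (if c > 1 then c * (c - 1) * 4 else 0) := by
    intro sm c; split <;> simp
  rw [PySem.List.foldl_congr_mem _ _
        (fun sm c => sm + (if c > 1 then c * (c - 1) * 4 else 0)) _
        (fun sm c _ => hstep sm c),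
      PySem.List.foldl_add]
  have hvals : (PySem.Dict.counter P).values
      = (PySem.Set.ofList P).map (fun k => (List.count k P : Int)) := by
    show (PySem.Dict.counter P).items.map (·.2) = _
    rw [PySem.Dict.items_counter]
    simp
  rw [hvals, List.map_map]
  -- B's scan via pv_foldNone, with the distinct products as index list
  rw [pv_foldNone (PySem.List.sorted P id) (PySem.Set.ofList P)
        (PySem.List.sorted_pairwise P id)
        (PySem.Set.nodup_ofList P)
        (fun k => by
          rw [PySem.Set.mem_ofList, PySem.List.mem_sorted])]
  -- same index list on both sides; compare the summands
  have hcnt : ∀ k, List.count k (PySem.List.sorted P id) = List.count k P :=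
    fun k => (PySem.List.sorted_perm P id false).count_eq k
  rw [zero_add]
  congr 1
  apply List.map_congr_left
  intro k hk
  have hk' : k ∈ P := (PySem.Set.mem_ofList P k).mp hk
  have hc : 1 ≤ List.count k P := List.count_pos_iff.mpr hk'
  unfold pvG
  rw [hcnt k]
  simp only [Function.comp]
  by_cases h : (List.count k P : Int) > 1
  · rw [if_pos h]; ring
  · have h1 : List.count k P = 1 := by omega
    rw [if_neg h, h1]
    simp

-- ===== VERDICT (by name: the statement is the Claim_ definition above) =====
theorem calculate_product_sum_spec : Claim_equal_calculate_product_sum := by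
  intro lst _
  unfold Spec_calculate_product_sum calculate_product_sum calculate_product_sum_alt
  dsimp only
  rw [pv_dict_eq]
  exact pv_main (pvProds lst)
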